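-- pv_equiv track=rewrite | github.com/RMIIIT/RM_Algo_RLE_Image_Text_Compression | text _and_image_rle_compression.py | decode_text_image
-- ===== SOURCE A (Python) =====
-- def decode_text_image(encodedImage):
--     decodeImage = []
--     numEncodedImage = 0
--     numDecodedImage = 0
--
--
--
--     # loop through every image i
--     for i in encodedImage:
--         rowDecoded = ''
--         count = 0
--         # loop through every character in the i
--         # and count how many consecutive elements of
--         # that character are on that image i
--         for character in i:
--             # if character is a digit
--             if character.isdigit():
--                 count = count * 10 + ord(character) - ord('0')
--             else:
--                 if count == 0:
--                     count = 1
--                 rowDecoded += character * count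
--                 count = 0
--         # add decoded i to list holding the image decoding
--         decodeImage.append(rowDecoded)
--         numEncodedImage += len(i)
--         numDecodedImage += len(rowDecoded)
--
--     return decodeImage, numEncodedImage, numDecodedImage
-- ===== SOURCE B (Python) =====
-- def _tokens(row):
--     # stage 1: group the row into maximal runs of digits / non-digits
--     toks = []
--     for ch in row:
--         d = ch.isdigit()
--         if toks and toks[-1][0] == d:
--             toks[-1][1].append(ch)
--         else:
--             toks.append((d, [ch]))
--     return toks
--
--
-- def _decode_row(row):
--     # stage 2: walk the runs; a digit run yields a pending count, a
--     # non-digit run emits its first char pending-or-1 times and the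
--     # rest verbatim; a trailing digit run is discarded
--     out = []
--     pending = 0
--     for is_d, chunk in _tokens(row):
--         if is_d:
--             pending = 0
--             for c in chunk:
--                 pending = pending * 10 + ord(c) - ord('0')
--         else:
--             out.append(chunk[0] * (pending if pending else 1))
--             out.extend(chunk[1:])
--             pending = 0
--     return ''.join(out)
--
--
-- def decode_text_image(encodedImage):
--     decoded = [_decode_row(r) for r in encodedImage]
--     return decoded, sum(map(len, encodedImage)), sum(map(len, decoded))
-- ===== Notes on version B (the rewrite author's own statement) =====
-- stated objective: alternative
-- what changed: B decodes each row in two staged passes: it first groups the row into maximal digit/non-digit runs (a groupby-style tokenizer), then walks the run list, turning each digit run into a pending count and emitting each non-digit run at once (first char repeated pending-or-1 times, the rest verbatim); totals are sums over the lists, where A is a single per-character state machine with threaded accumulators.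
import Mathlib
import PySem

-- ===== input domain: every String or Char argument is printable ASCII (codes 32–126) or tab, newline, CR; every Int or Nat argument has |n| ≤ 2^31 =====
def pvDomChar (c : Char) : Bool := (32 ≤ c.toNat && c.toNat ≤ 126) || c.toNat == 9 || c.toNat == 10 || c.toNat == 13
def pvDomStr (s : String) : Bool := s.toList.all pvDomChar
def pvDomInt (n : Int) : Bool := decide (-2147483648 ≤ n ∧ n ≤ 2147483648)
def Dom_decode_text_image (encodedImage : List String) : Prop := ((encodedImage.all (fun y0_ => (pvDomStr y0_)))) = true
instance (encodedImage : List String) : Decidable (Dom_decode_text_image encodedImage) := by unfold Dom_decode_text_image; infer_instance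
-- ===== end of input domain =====

-- B decodes each row in two staged passes (group into maximal digit/non-digit runs,
-- then emit whole runs) instead of A's per-character state machine; totals are sums
-- over the lists.  Same asymptotic cost, different decomposition (objective: alternative).

-- ===== PORT A =====
-- inner loop body of A: state (rowDecoded, count); Char.isDigit is exact for str.isdigit on the ASCII domain
def pvStepA (st : List Char × Int) (character : Char) : List Char × Int :=
  if character.isDigit then (st.1, st.2 * 10 + (character.toNat : Int) - 48)
  else
    let count := if st.2 == 0 then (1 : Int) else st.2
    (st.1 ++ List.replicate count.toNat character, 0)

def decode_text_image (encodedImage : List String) : List String × Int × Int :=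
  encodedImage.foldl
    (fun (st : List String × Int × Int) i =>
      let inner := i.toList.foldl pvStepA ([], 0)
      let rowDecoded := inner.1
      (st.1 ++ [String.ofList rowDecoded], st.2.1 + PySem.Str.len i, st.2.2 + (rowDecoded.length : Int)))
    ([], 0, 0)

-- ===== PORT B =====
-- Source B _tokens: the run list is accumulated in reverse (Python appends at the end and
-- mutates toks[-1]; here the open run is the head) and reversed once at the end
def pvToksStep (toks : List (Bool × List Char)) (ch : Char) : List (Bool × List Char) :=
  let d := ch.isDigit
  match toks with
  | (b, run) :: rest => if b == d then (b, run ++ [ch]) :: rest else (d, [ch]) :: (b, run) :: rest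
  | [] => [(d, [ch])]

def pvTokens (row : List Char) : List (Bool × List Char) :=
  (row.foldl pvToksStep []).reverse

-- Source B's digit-run fold: pending = pending*10 + ord(c) - ord('0')
def pvDigitStep (n : Int) (c : Char) : Int := n * 10 + (c.toNat : Int) - 48

-- Source B: out.append(chunk[0] * (pending if pending else 1)); out.extend(chunk[1:])
def pvEmit (chunk : List Char) (pending : Int) : List (List Char) :=
  match chunk with
  | [] => []
  | c :: rest => List.replicate (if pending == 0 then (1 : Int) else pending).toNat c :: rest.map (fun x => [x])

-- Source B _decode_row's loop body: state (out, pending)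
def pvEmitStep (st : List (List Char) × Int) (tok : Bool × List Char) : List (List Char) × Int :=
  if tok.1 then (st.1, tok.2.foldl pvDigitStep 0)
  else (st.1 ++ pvEmit tok.2 st.2, 0)

def pvDecodeRowB (row : List Char) : List Char :=
  (((pvTokens row).foldl pvEmitStep ([], 0)).1).flatten

def decode_text_image_alt (encodedImage : List String) : List String × Int × Int :=
  let decoded := encodedImage.map (fun r => String.ofList (pvDecodeRowB r.toList))
  (decoded,
   (encodedImage.map (fun r => PySem.Str.len r)).sum,
   (decoded.map (fun r => PySem.Str.len r)).sum)

-- ===== PRECONDITION & SPEC =====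
def Spec_decode_text_image (encodedImage : List String) (out : List String × Int × Int) : Prop := out = decode_text_image_alt encodedImage
instance (encodedImage : List String) (out : List String × Int × Int) : Decidable (Spec_decode_text_image encodedImage out) := by unfold Spec_decode_text_image; infer_instance

-- ===== CLAIM (what is proved, stated in full; the proofs are below) =====
def Claim_equal_decode_text_image : Prop := ∀ (encodedImage : List String), Dom_decode_text_image encodedImage → Spec_decode_text_image encodedImage (decode_text_image encodedImage)

-- ===== LEMMAS AND PROOFS =====

-- reference decoding of a row, recursion on characters
def pvSpec : List Char → Int → List Char
  | [], _ => []
  | c :: cs, cnt =>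
    if c.isDigit then pvSpec cs (pvDigitStep cnt c)
    else List.replicate (if cnt == 0 then (1 : Int) else cnt).toNat c ++ pvSpec cs 0

-- A's inner fold computes pvSpec
theorem pvFoldA_eq (cs : List Char) (cnt : Int) (acc : List Char) :
    (cs.foldl pvStepA (acc, cnt)).1 = acc ++ pvSpec cs cnt := by
  induction cs generalizing cnt acc with
  | nil => simp [pvSpec]
  | cons c cs ih =>
    by_cases hd : c.isDigit
    · rw [List.foldl_cons]
      have : pvStepA (acc, cnt) c = (acc, cnt * 10 + (c.toNat : Int) - 48) := by
        simp [pvStepA, hd]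
      rw [this, ih]
      simp [pvSpec, hd, pvDigitStep]
    · rw [List.foldl_cons]
      have hstep : pvStepA (acc, cnt) c =
          (acc ++ List.replicate (if cnt == 0 then (1 : Int) else cnt).toNat c, 0) := by
        simp [pvStepA, hd]
      rw [hstep, ih]
      simp [pvSpec, hd]

-- right-to-left grouping into maximal runs; equals pvTokens (proved via pvMerge below)
def pvGroup : List Char → List (Bool × List Char)
  | [] => []
  | c :: cs =>
    match pvGroup cs with
    | (b, run) :: rest => if b == c.isDigit then (b, c :: run) :: rest else (c.isDigit, [c]) :: (b, run) :: rest
    | [] => [(c.isDigit, [c])]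

def pvMerge (tok : Bool × List Char) (groups : List (Bool × List Char)) : List (Bool × List Char) :=
  match groups with
  | (b', r') :: t => if b' == tok.1 then (tok.1, tok.2 ++ r') :: t else tok :: groups
  | [] => [tok]

theorem pvGroup_eq_nil (cs : List Char) (h : pvGroup cs = []) : cs = [] := by
  cases cs with
  | nil => rfl
  | cons c cs =>
    rw [pvGroup] at h
    rcases hg : pvGroup cs with _ | ⟨⟨b', r'⟩, t⟩ <;> rw [hg] at h <;> simp at h
    split at h <;> simp at h

theorem pvGroup_cons (c : Char) (cs : List Char) :
    pvGroup (c :: cs) = (match pvGroup cs with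
      | (b, run) :: rest => if b == c.isDigit then (b, c :: run) :: rest else (c.isDigit, [c]) :: (b, run) :: rest
      | [] => [(c.isDigit, [c])]) := rfl

theorem pvToksFold_eq (cs : List Char) (b : Bool) (run : List Char) (rest : List (Bool × List Char)) :
    (cs.foldl pvToksStep ((b, run) :: rest)).reverse
      = rest.reverse ++ pvMerge (b, run) (pvGroup cs) := by
  induction cs generalizing b run rest with
  | nil => simp [pvGroup, pvMerge]
  | cons c cs ih =>
    rw [List.foldl_cons, pvGroup_cons]
    by_cases h : b = c.isDigit
    · subst h
      rw [show pvToksStep ((c.isDigit, run) :: rest) c = (c.isDigit, run ++ [c]) :: rest by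
        simp [pvToksStep]]
      rw [ih]
      rcases hg : pvGroup cs with _ | ⟨⟨b', r'⟩, t⟩
      · simp [pvMerge]
      · by_cases hb : b' = c.isDigit
        · subst hb
          simp [pvMerge]
        · simp only [pvMerge]
          rw [if_neg (by simpa using hb), if_neg (by simpa using hb)]
          simp
    · have h' : ¬ c.isDigit = b := fun hc => h hc.symm
      rw [show pvToksStep ((b, run) :: rest) c = (c.isDigit, [c]) :: (b, run) :: rest by
        simp only [pvToksStep]
        rw [if_neg (by simpa using h)]]
      rw [ih]
      rcases hg : pvGroup cs with _ | ⟨⟨b', r'⟩, t⟩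
      · have h2 : (c.isDigit == b) = false := by simpa using h'
        simp [pvMerge, h2]
      · by_cases hb : b' = c.isDigit
        · subst hb
          have h2 : (c.isDigit == b) = false := by simpa using h'
          simp [pvMerge, h2]
        · have h1 : (b' == c.isDigit) = false := by simpa using hb
          have h2 : (c.isDigit == b) = false := by simpa using h'
          simp [pvMerge, h1, h2]

theorem pvTokens_eq_group (cs : List Char) : pvTokens cs = pvGroup cs := by
  cases cs with
  | nil => simp [pvTokens, pvGroup]
  | cons c cs =>
    rw [pvTokens, List.foldl_cons]
    rw [show pvToksStep [] c = [(c.isDigit, [c])] from rfl, pvToksFold_eq, pvGroup_cons]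
    rcases hg : pvGroup cs with _ | ⟨⟨b', r'⟩, t⟩
    · simp [pvMerge]
    · cases hd : c.isDigit <;> cases b' <;> simp [pvMerge]

-- what B's emit fold produces, recursion on the token list
def pvE : List (Bool × List Char) → Int → List (List Char)
  | [], _ => []
  | (true, run) :: rest, _ => pvE rest (run.foldl pvDigitStep 0)
  | (false, chunk) :: rest, cnt => pvEmit chunk cnt ++ pvE rest 0

-- pvE with the digit fold continuing from the incoming pending count
def pvEcont : List (Bool × List Char) → Int → List (List Char)
  | [], _ => []
  | (true, run) :: rest, cnt => pvEcont rest (run.foldl pvDigitStep cnt)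
  | (false, chunk) :: rest, cnt => pvEmit chunk cnt ++ pvEcont rest 0

theorem pvFoldEmit_eq (t : List (Bool × List Char)) (acc : List (List Char)) (cnt : Int) :
    (t.foldl pvEmitStep (acc, cnt)).1 = acc ++ pvE t cnt := by
  induction t generalizing acc cnt with
  | nil => simp [pvE]
  | cons tok rest ih =>
    rcases tok with ⟨b, chunk⟩
    cases b
    · rw [List.foldl_cons]
      rw [show pvEmitStep (acc, cnt) (false, chunk) = (acc ++ pvEmit chunk cnt, 0) by
        simp [pvEmitStep]]
      rw [ih, pvE, List.append_assoc]
    · rw [List.foldl_cons]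
      rw [show pvEmitStep (acc, cnt) (true, chunk) = (acc, chunk.foldl pvDigitStep 0) by
        simp [pvEmitStep]]
      rw [ih, pvE]

-- adjacent groups produced by pvGroup carry different booleans
theorem pvGroup_alt (cs : List Char) :
    List.IsChain (fun a b : Bool × List Char => a.1 ≠ b.1) (pvGroup cs) := by
  induction cs with
  | nil => exact List.isChain_nil
  | cons c cs ih =>
    rw [pvGroup_cons]
    rcases hg : pvGroup cs with _ | ⟨⟨b', r'⟩, t⟩
    · exact List.isChain_singleton _
    · rw [hg] at ih
      by_cases hb : b' = c.isDigit
    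
      · subst hb
        simp only [beq_self_eq_true, if_true]
        cases t with
        | nil => exact List.isChain_singleton _
        | cons t0 ts =>
          rw [List.isChain_cons_cons] at ih ⊢
          exact ⟨ih.1, ih.2⟩
      · have hcond : (b' == c.isDigit) = false := by simpa using hb
        simp only [hcond, Bool.false_eq_true, if_false]
        exact List.isChain_cons_cons.mpr ⟨fun hc => hb hc.symm, ih⟩

theorem pvE_eq_pvEcont (t : List (Bool × List Char)) (cnt : Int)
    (halt : List.IsChain (fun a b : Bool × List Char => a.1 ≠ b.1) t)
    (h0 : ∀ r rest, t = (true, r) :: rest → cnt = 0) :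
    pvE t cnt = pvEcont t cnt := by
  induction t generalizing cnt with
  | nil => rfl
  | cons tok rest ih =>
    rcases tok with ⟨b, chunk⟩
    cases b
    · rw [pvE, pvEcont]
      congr 1
      exact ih 0 halt.tail (fun _ _ _ => rfl)
    · have hc : cnt = 0 := h0 chunk rest rfl
      subst hc
      rw [pvE, pvEcont]
      refine ih _ halt.tail ?_
      intro r rest' hr
      subst hr
      rw [List.isChain_cons_cons] at halt
      exact absurd rfl halt.1

theorem map_singleton_flatten (l : List Char) : (l.map (fun x => [x])).flatten = l := by
  induction l <;> simp_all

theorem pvEmit_flatten (c : Char) (r : List Char) (cnt : Int) :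
    (pvEmit (c :: r) cnt).flatten
      = List.replicate (if cnt == 0 then (1 : Int) else cnt).toNat c ++ r := by
  simp [pvEmit, map_singleton_flatten]

theorem pvEmit_flatten_zero (r : List Char) : (pvEmit r 0).flatten = r := by
  cases r <;> simp [pvEmit, map_singleton_flatten]

theorem pvEcont_group (cs : List Char) (cnt : Int) :
    (pvEcont (pvGroup cs) cnt).flatten = pvSpec cs cnt := by
  induction cs generalizing cnt with
  | nil => simp [pvGroup, pvEcont, pvSpec]
  | cons c cs ih =>
    cases hd : c.isDigit
    · rcases hg : pvGroup cs with _ | ⟨⟨b', r'⟩, t⟩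
      · have hcs := pvGroup_eq_nil cs hg
        subst hcs
        have hm : pvGroup [c] = [(false, [c])] := by rw [pvGroup_cons]; simp [pvGroup, hd]
        rw [hm, pvSpec]
        simp [pvEcont, pvSpec, pvEmit_flatten, hd]
      · cases b'
        · have hm : pvGroup (c :: cs) = (false, c :: r') :: t := by
            rw [pvGroup_cons, hg]; simp [hd]
          rw [hm, pvEcont, pvSpec]
          have h2 := ih 0
          rw [hg, pvEcont] at h2
          rw [← h2]
          simp [pvEmit_flatten, pvEmit_flatten_zero, hd]
        · have hm : pvGroup (c :: cs) = (false, [c]) :: (true, r') :: t := by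
            rw [pvGroup_cons, hg]; simp [hd]
          rw [hm, pvEcont, pvSpec]
          have h2 := ih 0
          rw [hg] at h2
          rw [← h2]
          simp [pvEmit_flatten, hd]
    · rcases hg : pvGroup cs with _ | ⟨⟨b', r'⟩, t⟩
      · have hcs := pvGroup_eq_nil cs hg
        subst hcs
        have hm : pvGroup [c] = [(true, [c])] := by rw [pvGroup_cons]; simp [pvGroup, hd]
        rw [hm, pvSpec]
        simp [pvEcont, pvSpec, hd]
      · cases b'
        · have hm : pvGroup (c :: cs) = (true, [c]) :: (false, r') :: t := by
            rw [pvGroup_cons, hg]; simp [hd]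
          rw [hm, pvEcont, pvSpec]
          have h2 := ih (pvDigitStep cnt c)
          rw [hg] at h2
          simp only [hd, if_true]
          rw [show [c].foldl pvDigitStep cnt = pvDigitStep cnt c from rfl]
          exact h2
        · have hm : pvGroup (c :: cs) = (true, c :: r') :: t := by
            rw [pvGroup_cons, hg]; simp [hd]
          rw [hm, pvEcont, pvSpec]
          have h2 := ih (pvDigitStep cnt c)
          rw [hg, pvEcont] at h2
          simp only [hd, if_true]
          rw [show (c :: r').foldl pvDigitStep cnt = r'.foldl pvDigitStep (pvDigitStep cnt c) from rfl]
          exact h2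

theorem pvRow_eq (row : String) :
    (row.toList.foldl pvStepA ([], 0)).1 = pvDecodeRowB row.toList := by
  rw [pvFoldA_eq, pvDecodeRowB, pvFoldEmit_eq, pvTokens_eq_group,
      pvE_eq_pvEcont _ _ (pvGroup_alt _) (fun _ _ _ => rfl)]
  simp [pvEcont_group]

theorem pvOuter_eq (rows : List String) (accL : List String) (accE accD : Int) :
    rows.foldl
      (fun (st : List String × Int × Int) i =>
        let inner := i.toList.foldl pvStepA ([], 0)
        let rowDecoded := inner.1
        (st.1 ++ [String.ofList rowDecoded], st.2.1 + PySem.Str.len i, st.2.2 + (rowDecoded.length : Int)))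
      (accL, accE, accD)
    = (accL ++ rows.map (fun r => String.ofList (pvDecodeRowB r.toList)),
       accE + (rows.map (fun r => PySem.Str.len r)).sum,
       accD + ((rows.map (fun r => String.ofList (pvDecodeRowB r.toList))).map
                (fun r => PySem.Str.len r)).sum) := by
  induction rows generalizing accL accE accD with
  | nil => simp
  | cons r rs ih =>
    simp only [List.foldl_cons, List.map_cons, List.sum_cons]
    rw [ih]
    refine Prod.ext ?_ (Prod.ext ?_ ?_)
    · simp [pvRow_eq]
    · simp; ring
    · simp [pvRow_eq, pysem]
      ring

-- ===== VERDICT (by name: the statement is the Claim_ definition above) =====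
theorem decode_text_image_spec : Claim_equal_decode_text_image := by
  intro encodedImage _
  show decode_text_image encodedImage = decode_text_image_alt encodedImage
  rw [decode_text_image, decode_text_image_alt]
  rw [pvOuter_eq]
  simp
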